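-- pv_equiv track=rewrite | github.com/rickardlindberg/rlselect | rlselectlib/filter.py | marks_to_ranges
-- ===== SOURCE A (Python) =====
-- def marks_to_ranges(marks):
--     result = []
--     start = None
--     end = None
--     for mark in sorted(marks):
--         if start is None:
--             start = mark
--             end = start + 1
--         elif mark > end:
--             result.append((start, end))
--             start = mark
--             end = start + 1
--         else:
--             end = mark + 1
--     if start is not None:
--         result.append((start, end))
--     return result
-- ===== SOURCE B (Python) =====
-- def marks_to_ranges(marks):
--     pts = sorted(set(marks))
--     if not pts:
--         return []
--     gaps = [(a, b) for a, b in zip(pts, pts[1:]) if b != a + 1]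
--     starts = [pts[0]] + [b for a, b in gaps]
--     ends = [a + 1 for a, b in gaps] + [pts[-1] + 1]
--     return list(zip(starts, ends))
-- ===== Notes on version B (the rewrite author's own statement) =====
-- stated objective: alternative
-- what changed: A's single pass with a running (start, end) accumulator and trailing flush is replaced by sorting the distinct marks and scanning adjacent pairs (zip) for gaps, building starts and ends lists that are zipped into the ranges.
import Mathlib
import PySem

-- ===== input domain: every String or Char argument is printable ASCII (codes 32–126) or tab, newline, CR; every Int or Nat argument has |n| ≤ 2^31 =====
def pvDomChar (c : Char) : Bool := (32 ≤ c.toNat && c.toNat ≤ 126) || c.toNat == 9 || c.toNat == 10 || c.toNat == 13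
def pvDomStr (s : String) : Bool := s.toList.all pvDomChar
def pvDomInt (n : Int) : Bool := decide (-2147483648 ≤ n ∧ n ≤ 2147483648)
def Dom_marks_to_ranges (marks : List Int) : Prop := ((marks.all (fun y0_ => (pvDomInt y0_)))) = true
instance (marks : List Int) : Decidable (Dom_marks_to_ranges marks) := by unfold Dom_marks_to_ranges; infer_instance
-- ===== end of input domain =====

-- B replaces A's running start/end accumulator with a sort of the distinct marks
-- followed by a gap scan over adjacent pairs (zip); objective: alternative decomposition, same cost.

-- ===== PORT A =====
-- loop body of A's for-loop: state = (result, start, end) with start/end Optional as in the Python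
def stepA (st : List (Int × Int) × Option Int × Option Int) (mark : Int) :
    List (Int × Int) × Option Int × Option Int :=
  match st with
  | (result, none, _) => (result, some mark, some (mark + 1))
  | (result, some start, some e) =>
      if mark > e then (result ++ [(start, e)], some mark, some (mark + 1))
      else (result, some start, some (mark + 1))
  | (result, some start, none) => (result, some start, some (mark + 1)) -- unreachable: end set with start

-- A's trailing 'if start is not None: result.append((start, end))'
def finA (st : List (Int × Int) × Option Int × Option Int) : List (Int × Int) :=
  match st with
  | (result, some s, some e) => result ++ [(s, e)]
  | (result, _, _) => result

def marks_to_ranges (marks : List Int) : List (Int × Int) :=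
  finA ((PySem.List.sorted marks (fun x => x) false).foldl stepA ([], none, none))

-- ===== PORT B =====
def marks_to_ranges_alt (marks : List Int) : List (Int × Int) :=
  let pts := PySem.List.sorted (PySem.Set.ofList marks) (fun x => x) false
  match pts with
  | [] => []
  | p :: rest =>
      -- gaps = [(a, b) for a, b in zip(pts, pts[1:]) if b != a + 1]
      let gaps := ((p :: rest).zip rest).filter (fun ab => decide (ab.2 ≠ ab.1 + 1))
      let starts := p :: gaps.map (fun ab => ab.2)
      -- pts[-1] via PySem.List.pyGetD (pts is nonempty here)
      let ends := gaps.map (fun ab => ab.1 + 1) ++ [PySem.List.pyGetD (p :: rest) (-1) 0 + 1]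
      starts.zip ends

-- ===== PRECONDITION & SPEC =====
def Spec_marks_to_ranges (marks : List Int) (out : List (Int × Int)) : Prop := out = marks_to_ranges_alt marks
instance (marks : List Int) (out : List (Int × Int)) : Decidable (Spec_marks_to_ranges marks out) := by unfold Spec_marks_to_ranges; infer_instance

-- ===== CLAIM (what is proved, stated in full; the proofs are below) =====
def Claim_equal_marks_to_ranges : Prop := ∀ (marks : List Int), Dom_marks_to_ranges marks → Spec_marks_to_ranges marks (marks_to_ranges marks)

-- ===== LEMMAS AND PROOFS =====

-- A's loop with the final append fused: current range (s, e), remaining sorted marks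
def mer (s e : Int) : List Int → List (Int × Int)
  | [] => [(s, e)]
  | m :: ms => if e < m then (s, e) :: mer m (m + 1) ms else mer s (m + 1) ms

-- end of the first range produced by mer
def fE (e : Int) : List Int → Int
  | [] => e
  | m :: ms => if e < m then e else fE (m + 1) ms

-- ranges after the first one produced by mer
def fT (e : Int) : List Int → List (Int × Int)
  | [] => []
  | m :: ms => if e < m then mer m (m + 1) ms else fT (m + 1) ms

-- adjacent dedup relative to previous element p
def dd (p : Int) : List Int → List Int
  | [] => []
  | x :: xs => if x = p then dd p xs else x :: dd x xs

lemma loopA_mer : ∀ (l : List Int) (res : List (Int × Int)) (s e : Int),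
    finA (l.foldl stepA (res, some s, some e)) = res ++ mer s e l := by
  intro l
  induction l with
  | nil => intro res s e; simp [finA, mer]
  | cons m l ih =>
      intro res s e
      rw [List.foldl_cons]
      by_cases h : e < m
      · have hs : stepA (res, some s, some e) m = (res ++ [(s, e)], some m, some (m + 1)) := by
          simp [stepA, h]
        rw [hs, ih, mer, if_pos h]
        simp
      · have hs : stepA (res, some s, some e) m = (res, some s, some (m + 1)) := by
          simp [stepA, h]
        rw [hs, ih, mer, if_neg h]

lemma mer_head_tail : ∀ (l : List Int) (s e : Int), mer s e l = (s, fE e l) :: fT e l := by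
  intro l
  induction l with
  | nil => intro s e; simp [mer, fE, fT]
  | cons m l ih =>
      intro s e
      by_cases h : e < m
      · simp [mer, fE, fT, h]
      · simp [mer, fE, fT, h, ih]

lemma mer_dd : ∀ (xs : List Int) (p s : Int), List.Pairwise (· ≤ ·) (p :: xs) →
    mer s (p + 1) xs = mer s (p + 1) (dd p xs) := by
  intro xs
  induction xs with
  | nil => intro p s _; rfl
  | cons x xs ih =>
      intro p s hc
      rcases List.pairwise_cons.mp hc with ⟨hall, hc'⟩
      have hpx : p ≤ x := hall x List.mem_cons_self
      by_cases h : x = p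
      · subst h
        have : mer s (x + 1) (x :: xs) = mer s (x + 1) xs := by
          simp [mer]
        rw [this, dd, if_pos rfl, ih x s hc']
      · have hlt : p < x := lt_of_le_of_ne hpx (fun hpe => h hpe.symm)
        rw [dd, if_neg h]
        by_cases hg : p + 1 < x
        · rw [mer, if_pos hg, mer, if_pos hg, ih x x hc']
        · have hx : x = p + 1 := by omega
          rw [mer, if_neg hg, mer, if_neg hg]
          exact ih x s hc'

lemma dd_pairwise_lt : ∀ (xs : List Int) (p : Int), List.Pairwise (· ≤ ·) (p :: xs) →
    List.Pairwise (· < ·) (p :: dd p xs) := by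
  intro xs
  induction xs with
  | nil => intro p _; simp [dd]
  | cons x xs ih =>
      intro p hc
      rcases List.pairwise_cons.mp hc with ⟨hall, hc'⟩
      have hpx : p ≤ x := hall x List.mem_cons_self
      by_cases h : x = p
      · subst h
        have hd : dd x (x :: xs) = dd x xs := by rw [dd, if_pos rfl]
        rw [hd]
        exact ih x hc'
      · have hlt : p < x := lt_of_le_of_ne hpx (fun hpe => h hpe.symm)
        rw [dd, if_neg h]
        have hx := ih x hc'
        refine List.pairwise_cons.mpr ⟨?_, hx⟩
        intro a ha
        rcases List.mem_cons.mp ha with ha | ha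
        · omega
        · have := (List.pairwise_cons.mp hx).1 a ha
          omega

lemma mem_dd : ∀ (xs : List Int) (p a : Int), a ∈ p :: dd p xs ↔ a ∈ p :: xs := by
  intro xs
  induction xs with
  | nil => intro p a; rfl
  | cons x xs ih =>
      intro p a
      by_cases h : x = p
      · subst h
        have hd : dd x (x :: xs) = dd x xs := by rw [dd, if_pos rfl]
        rw [hd]
        have hx := ih x a
        simp only [List.mem_cons] at hx ⊢
        tauto
      · have hd : dd p (x :: xs) = x :: dd x xs := by rw [dd, if_neg h]
        rw [hd]
        have hx := ih x a
        simp only [List.mem_cons] at hx ⊢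
        tauto

lemma strict_ext : ∀ (l1 l2 : List Int), List.Pairwise (· < ·) l1 → List.Pairwise (· < ·) l2 →
    (∀ a, a ∈ l1 ↔ a ∈ l2) → l1 = l2 := by
  intro l1
  induction l1 with
  | nil =>
      intro l2 _ _ hm
      cases l2 with
      | nil => rfl
      | cons y ys => exact absurd ((hm y).mpr List.mem_cons_self) (by simp)
  | cons x xs ih =>
      intro l2 h1 h2 hm
      cases l2 with
      | nil => exact absurd ((hm x).mp List.mem_cons_self) (by simp)
      | cons y ys =>
          rcases List.pairwise_cons.mp h1 with ⟨hx, hxs⟩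
          rcases List.pairwise_cons.mp h2 with ⟨hy, hys⟩
          have hxy : x = y := by
            have h1' := (hm x).mp List.mem_cons_self
            have h2' := (hm y).mpr List.mem_cons_self
            simp at h1' h2'
            rcases h1' with h1' | h1'
            · exact h1'
            · rcases h2' with h2' | h2'
              · exact h2'.symm
              · have := hy x h1'
                have := hx y h2'
                omega
          subst hxy
          have hmem : ∀ a, a ∈ xs ↔ a ∈ ys := by
            intro a
            constructor
            · intro ha
              have := (hm a).mp (List.mem_cons_of_mem _ ha)
              have hax : x < a := hx a ha
              simp at this
              rcases this with h | h
              · omega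
              · exact h
            · intro ha
              have := (hm a).mpr (List.mem_cons_of_mem _ ha)
              have hax : x < a := hy a ha
              simp at this
              rcases this with h | h
              · omega
              · exact h
          rw [ih ys hxs hys hmem]

lemma pyGetD_last (l : List Int) (x : Int) :
    PySem.List.pyGetD (x :: l) (-1) 0 = (x :: l).getLast?.getD 0 := by
  simp only [PySem.List.pyGetD, PySem.List.pyGet?_neg_one]

lemma zip_eq_mer : ∀ (rest : List Int) (p : Int), List.Pairwise (· < ·) (p :: rest) →
    (p :: (((p :: rest).zip rest).filter (fun ab => decide (ab.2 ≠ ab.1 + 1))).map (fun ab => ab.2)).zip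
      ((((p :: rest).zip rest).filter (fun ab => decide (ab.2 ≠ ab.1 + 1))).map (fun ab => ab.1 + 1) ++
        [PySem.List.pyGetD (p :: rest) (-1) 0 + 1])
    = mer p (p + 1) rest := by
  intro rest
  induction rest with
  | nil => intro p _; simp [mer, pyGetD_last]
  | cons q rest ih =>
      intro p hc
      rcases List.pairwise_cons.mp hc with ⟨hall, hc'⟩
      have hpq : p < q := hall q List.mem_cons_self
      have hzip : (p :: q :: rest).zip (q :: rest) = (p, q) :: (q :: rest).zip rest := rfl
      have hlast : PySem.List.pyGetD (p :: q :: rest) (-1) 0 = PySem.List.pyGetD (q :: rest) (-1) 0 := by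
        simp only [PySem.List.pyGetD, PySem.List.pyGet?_neg_one, List.getLast?_cons_cons]
      by_cases hg : q = p + 1
      · -- no gap between p and q: p extends the first run
        have hIH := ih q hc'
        rw [mer, if_neg (by omega)]
        rw [hzip]
        rw [List.filter_cons_of_neg (by simp [hg])]
        rw [hlast]
        -- the ends list is nonempty: peel its head
        rcases hE : (((q :: rest).zip rest).filter (fun ab => decide (ab.2 ≠ ab.1 + 1))).map
            (fun ab => ab.1 + 1) ++ [PySem.List.pyGetD (q :: rest) (-1) 0 + 1] with _ | ⟨e0, E1⟩
        · exact absurd hE (by simp)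
        · rw [hE] at hIH
          rw [List.zip_cons_cons] at hIH ⊢
          rw [mer_head_tail] at hIH
          have he0 : e0 = fE (q + 1) rest := by
            have := (List.cons.injEq _ _ _ _).mp hIH
            exact (Prod.mk.injEq _ _ _ _).mp this.1 |>.2
          have ht : (((((q :: rest).zip rest).filter (fun ab => decide (ab.2 ≠ ab.1 + 1))).map
              (fun ab => ab.2)).zip E1) = fT (q + 1) rest := by
            have := (List.cons.injEq _ _ _ _).mp hIH
            exact this.2
          rw [he0, ht, mer_head_tail]
      · -- gap: first range is (p, p+1)
        have hglt : p + 1 < q := by omega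
        rw [mer, if_pos hglt]
        rw [hzip]
        rw [List.filter_cons_of_pos (by simp [hg])]
        rw [hlast]
        simp only [List.map_cons, List.cons_append, List.zip_cons_cons]
        rw [ih q hc']

-- ===== VERDICT (by name: the statement is the Claim_ definition above) =====
theorem marks_to_ranges_spec : Claim_equal_marks_to_ranges := by
  intro marks _
  unfold Spec_marks_to_ranges
  cases h : PySem.List.sorted marks (fun x => x) false with
  | nil =>
      have hm : marks = [] := (PySem.List.sorted_eq_nil_iff _ _ _).mp h
      subst hm
      rfl
  | cons m ms =>
      have hch : List.Pairwise (· ≤ ·) (m :: ms) := h ▸ PySem.List.sorted_pairwise marks (fun x => x)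
      have hlt : List.Pairwise (· < ·) (m :: dd m ms) := dd_pairwise_lt ms m hch
      have hpts : PySem.List.sorted (PySem.Set.ofList marks) (fun x => x) false = m :: dd m ms := by
        apply strict_ext
        · exact PySem.List.sorted_ofList_pairwise_lt marks
        · exact hlt
        · intro a
          rw [mem_dd, PySem.List.mem_sorted, PySem.Set.mem_ofList,
            ← PySem.List.mem_sorted (key := fun x => x) (rev := false), h]
      have hA : marks_to_ranges marks = mer m (m + 1) ms := by
        unfold marks_to_ranges
        rw [h, List.foldl_cons]
        have hs0 : stepA ([], none, none) m = ([], some m, some (m + 1)) := rfl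
        rw [hs0, loopA_mer]
        rfl
      have hB : marks_to_ranges_alt marks = mer m (m + 1) (dd m ms) := by
        unfold marks_to_ranges_alt
        rw [hpts]
        exact zip_eq_mer (dd m ms) m hlt
      rw [hA, hB]
      exact mer_dd ms m m hch
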